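-- pv_equiv track=rewrite | github.com/Sumanth-Katnam/leet-code-py | Interview Questions OLD/filterFrequencies.py | countSignals
-- ===== SOURCE A (Python) =====
-- def countSignals(frequencies, filtersRanges):
--     start = filtersRanges[0][0]
--     end = filtersRanges[0][1]
--
--     for s,e in filtersRanges:
--         if start < s:
--             start = s
--         if end > e:
--             end = e
--
--     count = 0
--     for i in frequencies:
--         if start <= i <= end:
--             count += 1
--
--     return count
-- ===== SOURCE B (Python) =====
-- def countSignals(frequencies, filtersRanges):
--     return sum(1 for i in frequencies
--                if all(s <= i <= e for s, e in filtersRanges))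
-- ===== Notes on version B (the rewrite author's own statement) =====
-- stated objective: simpler
-- what changed: B drops the intersection-range precomputation and directly counts frequencies that lie inside every filter range with a single sum/all comprehension.
import Mathlib
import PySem

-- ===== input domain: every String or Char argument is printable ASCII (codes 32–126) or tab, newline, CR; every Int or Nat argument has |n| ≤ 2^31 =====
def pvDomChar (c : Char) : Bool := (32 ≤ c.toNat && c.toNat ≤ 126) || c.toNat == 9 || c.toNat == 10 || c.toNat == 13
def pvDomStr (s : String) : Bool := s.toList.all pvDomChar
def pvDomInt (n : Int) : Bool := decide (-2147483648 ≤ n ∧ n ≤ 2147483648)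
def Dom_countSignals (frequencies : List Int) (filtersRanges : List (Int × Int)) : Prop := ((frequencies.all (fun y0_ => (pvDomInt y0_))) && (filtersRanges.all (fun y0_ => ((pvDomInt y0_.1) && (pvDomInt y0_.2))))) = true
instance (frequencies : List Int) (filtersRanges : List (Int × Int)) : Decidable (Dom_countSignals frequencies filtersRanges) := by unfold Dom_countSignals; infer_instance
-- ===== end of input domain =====

-- B replaces A's intersection-range precomputation by a direct sum/all count; return-value equivalence on nonempty filtersRanges.

-- ===== PORT A =====
-- A: compute the intersection [start, end] of all ranges, then count frequencies inside it.
def countSignals (frequencies : List Int) (filtersRanges : List (Int × Int)) : Int :=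
  match filtersRanges with
  | [] => 0  -- unreachable: Python A raises IndexError here; excluded by Pre_
  | (s0, e0) :: _ =>
    let p := filtersRanges.foldl
      (fun (p : Int × Int) (se : Int × Int) =>
        (if p.1 < se.1 then se.1 else p.1, if p.2 > se.2 then se.2 else p.2))
      (s0, e0)
    frequencies.foldl (fun c i => if p.1 ≤ i ∧ i ≤ p.2 then c + 1 else c) 0

-- ===== PORT B =====
-- B: count frequencies i such that every (s, e) filter satisfies s ≤ i ≤ e.
def countSignals_alt (frequencies : List Int) (filtersRanges : List (Int × Int)) : Int :=
  frequencies.foldl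
    (fun c i => if filtersRanges.all (fun se => decide (se.1 ≤ i ∧ i ≤ se.2)) then c + 1 else c) 0

-- ===== PRECONDITION & SPEC =====
-- Pre_ excludes empty filtersRanges, on which Python A raises IndexError at filtersRanges[0][0].
def Pre_countSignals (frequencies : List Int) (filtersRanges : List (Int × Int)) : Prop :=
  filtersRanges ≠ []
instance (frequencies : List Int) (filtersRanges : List (Int × Int)) : Decidable (Pre_countSignals frequencies filtersRanges) := by unfold Pre_countSignals; infer_instance
def pvWitness_countSignals : List Int × (List (Int × Int)) := ([1, 5, 10], [(0, 7), (2, 12)])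


def Spec_countSignals (frequencies : List Int) (filtersRanges : List (Int × Int)) (out : Int) : Prop := out = countSignals_alt frequencies filtersRanges
instance (frequencies : List Int) (filtersRanges : List (Int × Int)) (out : Int) : Decidable (Spec_countSignals frequencies filtersRanges out) := by unfold Spec_countSignals; infer_instance

-- ===== CLAIM (what is proved, stated in full; the proofs are below) =====
def Claim_equal_countSignals : Prop := ∀ (frequencies : List Int) (filtersRanges : List (Int × Int)), Dom_countSignals frequencies filtersRanges → Pre_countSignals frequencies filtersRanges → Spec_countSignals frequencies filtersRanges (countSignals frequencies filtersRanges)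

-- ===== LEMMAS AND PROOFS =====

-- The fold that tightens (start, end) over l yields bounds that i satisfies
-- iff i satisfies the initial bounds and every range in l.
theorem foldl_bounds_iff (l : List (Int × Int)) (a b i : Int) :
    (let p := l.foldl
        (fun (p : Int × Int) (se : Int × Int) =>
          (if p.1 < se.1 then se.1 else p.1, if p.2 > se.2 then se.2 else p.2))
        (a, b)
     p.1 ≤ i ∧ i ≤ p.2) ↔
    ((a ≤ i ∧ i ≤ b) ∧ l.all (fun se => decide (se.1 ≤ i ∧ i ≤ se.2)) = true) := by
  induction l generalizing a b with
  | nil => simp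
  | cons hd tl ih =>
    simp only [List.foldl_cons, List.all_cons, Bool.and_eq_true, decide_eq_true_eq]
    rw [ih]
    constructor
    · rintro ⟨⟨h1, h2⟩, h3⟩
      split_ifs at h1 h2 <;> exact ⟨⟨by omega, by omega⟩, ⟨by omega, by omega⟩, h3⟩
    · rintro ⟨⟨h1, h2⟩, ⟨h3, h4⟩, h5⟩
      refine ⟨⟨?_, ?_⟩, h5⟩ <;> split_ifs <;> omega

theorem countSignals_eq_alt (frequencies : List Int) (filtersRanges : List (Int × Int))
    (h : filtersRanges ≠ []) :
    countSignals frequencies filtersRanges = countSignals_alt frequencies filtersRanges := by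
  match filtersRanges, h with
  | (s0, e0) :: rest, _ =>
    unfold countSignals countSignals_alt
    dsimp only
    congr 1
    funext c i
    have key := foldl_bounds_iff ((s0, e0) :: rest) s0 e0 i
    simp only at key
    by_cases hc : ((s0, e0) :: rest).all (fun se => decide (se.1 ≤ i ∧ i ≤ se.2)) = true
    · have hall := hc
      simp only [List.all_cons, Bool.and_eq_true, decide_eq_true_eq] at hall
      rw [if_pos (key.mpr ⟨hall.1, hc⟩), if_pos hc]
    · have hnot : ¬ _ := fun hx => hc (key.mp hx).2
      rw [if_neg hnot, if_neg hc]

-- ===== VERDICT (by name: the statement is the Claim_ definition above) =====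
theorem countSignals_spec : Claim_equal_countSignals := by
  intro frequencies filtersRanges _ hpre
  exact countSignals_eq_alt frequencies filtersRanges hpre
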